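-- pv_equiv track=rewrite | github.com/SeraphWedd/CodeChef_Codes-Python-3.x- | beginner/SEGM01.py | segm
-- ===== SOURCE A (Python) =====
-- def segm(s):
--     start = False
--     end = False
--     for c in s:
--         if c == '1':
--             if end:
--                 return 'NO'
--             if not start:
--                 start = True
--
--         if c == '0':
--             if start:
--                 end = True
--     if not start:
--         return 'NO'
--     else:
--         return 'YES'
-- ===== SOURCE B (Python) =====
-- def segm(s):
--     # keep only the meaningful characters, strip the zeros at both ends:
--     # the ones form one segment iff something is left and no zero is inside
--     t = ''.join(c for c in s if c == '0' or c == '1').strip('0')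
--     if t and '0' not in t:
--         return 'YES'
--     return 'NO'
-- ===== Notes on version B (the rewrite author's own statement) =====
-- stated objective: simpler
-- what changed: Replaces the stateful start/end automaton with a declarative pipeline: keep only '0'/'1' characters, strip zeros from both ends, and answer YES iff something is left and no '0' remains inside.
import Mathlib
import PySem

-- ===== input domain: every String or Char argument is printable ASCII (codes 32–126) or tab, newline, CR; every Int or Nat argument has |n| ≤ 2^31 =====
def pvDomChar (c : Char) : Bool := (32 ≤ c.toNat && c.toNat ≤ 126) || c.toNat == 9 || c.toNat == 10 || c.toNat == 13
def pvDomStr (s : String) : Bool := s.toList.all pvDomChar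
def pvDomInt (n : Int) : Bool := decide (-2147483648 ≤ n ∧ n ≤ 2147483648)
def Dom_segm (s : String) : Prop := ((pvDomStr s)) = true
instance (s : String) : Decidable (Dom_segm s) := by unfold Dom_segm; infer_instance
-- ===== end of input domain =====

-- B replaces A's stateful start/end automaton with a filter/strip pipeline (same O(n) cost, simpler).

-- ===== PORT A =====
-- the for-loop with state (start, end) and an early 'return NO'
def segmLoop : List Char → Bool → Bool → String
  | [], start, _ => if !start then "NO" else "YES"
  | c :: cs, start, en =>
      if c == '1' && en then "NO"
      else
        let start' := if c == '1' then true else start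
        let en' := if c == '0' && start' then true else en
        segmLoop cs start' en'

def segm (s : String) : String := segmLoop s.toList false false

-- ===== PORT B =====
def segm_alt (s : String) : String :=
  let t := PySem.Str.stripChars
             (String.ofList (s.toList.filter (fun c => c == '0' || c == '1'))) "0"
  if t != "" && !(PySem.Str.isIn "0" t) then "YES" else "NO"

-- ===== PRECONDITION & SPEC =====
def Spec_segm (s : String) (out : String) : Prop := out = segm_alt s
instance (s : String) (out : String) : Decidable (Spec_segm s out) := by unfold Spec_segm; infer_instance

-- ===== CLAIM (what is proved, stated in full; the proofs are below) =====
def Claim_equal_segm : Prop := ∀ (s : String), Dom_segm s → Spec_segm s (segm s)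

-- ===== LEMMAS AND PROOFS =====

-- characters other than '0'/'1' are transparent for A's automaton
theorem segmLoop_filter (l : List Char) (st en : Bool) :
    segmLoop l st en = segmLoop (l.filter (fun c => c == '0' || c == '1')) st en := by
  induction l generalizing st en with
  | nil => rfl
  | cons c cs ih =>
    by_cases h0 : c = '0'
    · subst h0; simp [segmLoop, List.filter, ih]
    · by_cases h1 : c = '1'
      · subst h1; simp [segmLoop, List.filter, ih]
      · have e0 : (c == '0') = false := by simpa using h0
        have e1 : (c == '1') = false := by simpa using h1
        simp [segmLoop, List.filter, e0, e1, ih]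

-- leading zeros are skipped in the initial state
theorem segmLoop_dropWhile (l : List Char) :
    segmLoop l false false = segmLoop (l.dropWhile (· == '0')) false false := by
  induction l with
  | nil => rfl
  | cons c cs ih =>
    by_cases h0 : c = '0'
    · subst h0; simpa [segmLoop, List.dropWhile] using ih
    · have e0 : (c == '0') = false := by simpa using h0
      simp [List.dropWhile, e0]

-- state (true, true): any further '1' is fatal
theorem segmLoop_tt (l : List Char) (hp : ∀ c ∈ l, c = '0' ∨ c = '1') :
    segmLoop l true true = if l.all (· == '0') then "YES" else "NO" := by
  induction l with
  | nil => rfl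
  | cons c cs ih =>
    rcases hp c (by simp) with h | h <;> subst h
    · simpa [segmLoop] using ih (fun c hc => hp c (by simp [hc]))
    · simp [segmLoop]

-- state (true, false): YES iff the rest is ones then zeros
theorem segmLoop_tf (l : List Char) (hp : ∀ c ∈ l, c = '0' ∨ c = '1') :
    segmLoop l true false =
      if ((l.dropWhile (· == '1')).all (· == '0')) then "YES" else "NO" := by
  induction l with
  | nil => rfl
  | cons c cs ih =>
    rcases hp c (by simp) with h | h <;> subst h
    · have := segmLoop_tt cs (fun c hc => hp c (by simp [hc]))
      simp [segmLoop, List.dropWhile, this]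
    · simpa [segmLoop, List.dropWhile] using ih (fun c hc => hp c (by simp [hc]))

theorem head_dropWhile_false {α : Type} (p : α → Bool) (l : List α) (c : α) (rest : List α)
    (h : l.dropWhile p = c :: rest) : p c = false := by
  induction l with
  | nil => simp at h
  | cons x xs ih =>
    rw [List.dropWhile_cons] at h
    split at h
    · exact ih h
    · next hp => cases h; simpa using hp

theorem dropWhile_replicate_append {α : Type} (p : α → Bool) (c : α) (n : Nat) (t : List α)
    (h : p c = true) : List.dropWhile p (List.replicate n c ++ t) = List.dropWhile p t := by
  induction n with
  | zero => simp
  | succ n ih => simp [List.replicate_succ, h, ih]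

theorem dropWhile_replicate_self {α : Type} (p : α → Bool) (c : α) (n : Nat)
    (h : p c = false) : List.dropWhile p (List.replicate n c) = List.replicate n c := by
  cases n with
  | zero => simp
  | succ n => simp [List.replicate_succ, h]

theorem dropWhile_append_singleton {α : Type} (p : α → Bool) (u : List α) (x : α)
    (h : p x = false) : List.dropWhile p (u ++ [x]) = List.dropWhile p u ++ [x] := by
  rw [List.dropWhile_append]
  split
  · next he => simp [List.dropWhile, h, List.isEmpty_iff.mp he]
  · rfl

-- ones-then-zeros characterisation of A's remaining test
theorem shape_iff_left (l : List Char) (hp : ∀ c ∈ l, c = '0' ∨ c = '1') :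
    ((l.dropWhile (· == '1')).all (· == '0') = true) ↔
      ∃ a b, l = List.replicate a '1' ++ List.replicate b '0' := by
  constructor
  · intro h
    refine ⟨(l.takeWhile (· == '1')).length, (l.dropWhile (· == '1')).length, ?_⟩
    have h1 : l.takeWhile (· == '1') = List.replicate (l.takeWhile (· == '1')).length '1' :=
      List.eq_replicate_length.mpr (fun b hb => by simpa using List.mem_takeWhile_imp hb)
    have h2 : l.dropWhile (· == '1') = List.replicate (l.dropWhile (· == '1')).length '0' :=
      List.eq_replicate_length.mpr (fun b hb => by
        have := List.all_eq_true.mp h b hb; simpa using this)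
    conv_lhs => rw [← List.takeWhile_append_dropWhile (p := (· == '1')) (l := l)]
    rw [← h1, ← h2]
  · rintro ⟨a, b, rfl⟩
    rw [dropWhile_replicate_append _ _ _ _ (by simp),
        dropWhile_replicate_self _ _ _ (by simp)]
    simp

-- ones-then-zeros characterisation of B's remaining test
theorem shape_iff_right (l : List Char) (hp : ∀ c ∈ l, c = '0' ∨ c = '1') :
    ('0' ∉ (l.reverse.dropWhile (· == '0'))) ↔
      ∃ a b, l = List.replicate a '1' ++ List.replicate b '0' := by
  constructor
  · intro h
    refine ⟨(l.reverse.dropWhile (· == '0')).length, (l.reverse.takeWhile (· == '0')).length, ?_⟩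
    have h1 : l.reverse.takeWhile (· == '0') =
        List.replicate (l.reverse.takeWhile (· == '0')).length '0' :=
      List.eq_replicate_length.mpr (fun b hb => by simpa using List.mem_takeWhile_imp hb)
    have h2 : l.reverse.dropWhile (· == '0') =
        List.replicate (l.reverse.dropWhile (· == '0')).length '1' := by
      refine List.eq_replicate_length.mpr (fun b hb => ?_)
      have hbl : b ∈ l := by
        have : b ∈ l.reverse := (List.dropWhile_sublist _).mem hb
        simpa using this
      rcases hp b hbl with h0 | h1
      · exact absurd (h0 ▸ hb) h
      · exact h1
    have : l.reverse = List.replicate (l.reverse.takeWhile (· == '0')).length '0' ++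
        List.replicate (l.reverse.dropWhile (· == '0')).length '1' := by
      conv_lhs => rw [← List.takeWhile_append_dropWhile (p := (· == '0')) (l := l.reverse)]
      rw [← h1, ← h2]
    have := congrArg List.reverse this
    simpa [List.reverse_append] using this
  · rintro ⟨a, b, rfl⟩
    rw [List.reverse_append, List.reverse_replicate, List.reverse_replicate,
        dropWhile_replicate_append _ _ _ _ (by simp),
        dropWhile_replicate_self _ _ _ (by simp)]
    simp [List.mem_replicate]

theorem singleton_infix_iff {α : Type} (c : α) (l : List α) : [c] <:+: l ↔ c ∈ l := by
  constructor
  · intro h; exact List.singleton_sublist.mp h.sublist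
  · intro h
    rcases List.append_of_mem h with ⟨u, v, rfl⟩
    exact ⟨u, v, by simp⟩

-- the two remaining tests agree
theorem tests_agree (rest : List Char) (hp : ∀ c ∈ rest, c = '0' ∨ c = '1') :
    ((rest.dropWhile (· == '1')).all (· == '0') = true) ↔
      ('0' ∉ (rest.reverse.dropWhile (· == '0'))) :=
  (shape_iff_left rest hp).trans (shape_iff_right rest hp).symm

-- ===== VERDICT (by name: the statement is the Claim_ definition above) =====
theorem segm_spec : Claim_equal_segm := by
  intro s _
  unfold Spec_segm segm segm_alt
  have hq : (fun c : Char => decide (c = '0')) = (fun c : Char => c == '0') := by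
    funext c
    by_cases h : c = '0' <;> simp [h]
  have hstrip : (PySem.Str.stripChars
      (String.ofList (s.toList.filter (fun c => c == '0' || c == '1'))) "0").toList =
      (List.dropWhile (· == '0')
        (List.dropWhile (· == '0') (s.toList.filter (fun c => c == '0' || c == '1'))).reverse).reverse := by
    simp [PySem.Str.stripChars, PySem.Chars.stripChars]
    rw [hq]
  have hp01 : ∀ c ∈ s.toList.filter (fun c => c == '0' || c == '1'), c = '0' ∨ c = '1' := by
    intro c hc
    have := (List.mem_filter.mp hc).2
    simpa using this
  rw [segmLoop_filter, segmLoop_dropWhile]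
  cases hm : List.dropWhile (· == '0') (s.toList.filter (fun c => c == '0' || c == '1')) with
  | nil =>
    have ht : (PySem.Str.stripChars
        (String.ofList (s.toList.filter (fun c => c == '0' || c == '1'))) "0") = "" := by
      apply String.toList_inj.mp
      rw [hstrip, hm]
      rfl
    simp [segmLoop, ht]
  | cons c rest =>
    -- the head of the stripped list is a '1'
    have hc0 : (c == '0') = false := head_dropWhile_false (· == '0') _ c rest hm
    have hmem : ∀ x ∈ c :: rest, x = '0' ∨ x = '1' := by
      intro x hx
      exact hp01 x ((hm ▸ List.dropWhile_sublist _).mem hx)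
    have hc1 : c = '1' := by
      rcases hmem c (by simp) with h | h
      · rw [h] at hc0; simp at hc0
      · exact h
    subst hc1
    have hrest : ∀ x ∈ rest, x = '0' ∨ x = '1' := fun x hx => hmem x (by simp [hx])
    -- A's side: one automaton step, then the (true,false) characterisation
    have hA : segmLoop ('1' :: rest) false false = segmLoop rest true false := by
      simp [segmLoop]
    rw [hA, segmLoop_tf rest hrest]
    -- B's side: the strip keeps the leading '1'
    have hw : (PySem.Str.stripChars
        (String.ofList (s.toList.filter (fun c => c == '0' || c == '1'))) "0").toList =
        '1' :: (List.dropWhile (· == '0') rest.reverse).reverse := by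
      rw [hstrip, hm, List.reverse_cons,
          dropWhile_append_singleton _ _ _ (by simp), List.reverse_append]
      rfl
    -- B's Boolean condition in terms of the stripped list
    have hne : ((PySem.Str.stripChars
        (String.ofList (s.toList.filter (fun c => c == '0' || c == '1'))) "0") != "") = true := by
      simp only [bne_iff_ne, ne_eq]
      intro he
      rw [he] at hw
      simp at hw
    have hisin : (PySem.Str.isIn "0" (PySem.Str.stripChars
        (String.ofList (s.toList.filter (fun c => c == '0' || c == '1'))) "0")) = false ↔
        '0' ∉ (List.dropWhile (· == '0') rest.reverse) := by
      rw [← Bool.not_eq_true, PySem.Str.isIn_iff_infix, hw,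
          show ("0" : String).toList = ['0'] from rfl, singleton_infix_iff]
      simp
    by_cases hE : ((rest.dropWhile (· == '1')).all (· == '0') = true)
    · have h2 := hisin.mpr ((tests_agree rest hrest).mp hE)
      rw [if_pos hE]
      show _ = if ((PySem.Str.stripChars (String.ofList
          (s.toList.filter (fun c => c == '0' || c == '1'))) "0" != "") &&
          !(PySem.Str.isIn "0" (PySem.Str.stripChars (String.ofList
          (s.toList.filter (fun c => c == '0' || c == '1'))) "0"))) = true
        then "YES" else "NO"
      rw [hne, h2]
      rfl
    · have hB : ¬ '0' ∉ (List.dropWhile (· == '0') rest.reverse) :=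
        fun h => hE ((tests_agree rest hrest).mpr h)
      have h2 : (PySem.Str.isIn "0" (PySem.Str.stripChars
          (String.ofList (s.toList.filter (fun c => c == '0' || c == '1'))) "0")) = true := by
        cases hioc : PySem.Str.isIn "0" (PySem.Str.stripChars
            (String.ofList (s.toList.filter (fun c => c == '0' || c == '1'))) "0") with
        | false => exact absurd (hisin.mp hioc) hB
        | true => rfl
      rw [if_neg hE]
      show _ = if ((PySem.Str.stripChars (String.ofList
          (s.toList.filter (fun c => c == '0' || c == '1'))) "0" != "") &&
          !(PySem.Str.isIn "0" (PySem.Str.stripChars (String.ofList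
          (s.toList.filter (fun c => c == '0' || c == '1'))) "0"))) = true
        then "YES" else "NO"
      rw [h2]
      simp
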